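-- pv_equiv track=rewrite | github.com/jacobselbok/mini_project_2 | vejfinding_med_grafer_v2.py | make_empty_grid
-- ===== SOURCE A (Python) =====
-- def make_empty_grid(grid_size):
--     grid = []
--     for y in range(grid_size[1]):
--         grid.append([])
--         for x in range(grid_size[0]):
--             if y == 0 or y == grid_size[1] - 1:
--                 grid[-1].append(1)
--             else:
--                 if x == 0 or x == grid_size[0] - 1:
--                     grid[-1].append(1)
--                 else:
--                     grid[-1].append(0)
--     return grid
-- ===== SOURCE B (Python) =====
-- def make_empty_grid(grid_size):
--     w, h = grid_size[0], grid_size[1]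
--     # phase 1: full grid of interior zeros
--     grid = [[0] * w for _ in range(h)]
--     # phase 2: paint the border
--     if h > 0:
--         grid[0] = [1] * w
--         grid[-1] = [1] * w
--     if w > 0:
--         for row in grid:
--             row[0] = 1
--             row[-1] = 1
--     return grid
-- ===== Notes on version B (the rewrite author's own statement) =====
-- stated objective: idiomatic
-- what changed: B allocates the whole grid as zero rows via list multiplication in one phase, then paints the border (top/bottom rows replaced by [1]*w, first/last cell of every row set to 1) in a second phase, instead of A's per-cell nested-loop conditional append.
import Mathlib
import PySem

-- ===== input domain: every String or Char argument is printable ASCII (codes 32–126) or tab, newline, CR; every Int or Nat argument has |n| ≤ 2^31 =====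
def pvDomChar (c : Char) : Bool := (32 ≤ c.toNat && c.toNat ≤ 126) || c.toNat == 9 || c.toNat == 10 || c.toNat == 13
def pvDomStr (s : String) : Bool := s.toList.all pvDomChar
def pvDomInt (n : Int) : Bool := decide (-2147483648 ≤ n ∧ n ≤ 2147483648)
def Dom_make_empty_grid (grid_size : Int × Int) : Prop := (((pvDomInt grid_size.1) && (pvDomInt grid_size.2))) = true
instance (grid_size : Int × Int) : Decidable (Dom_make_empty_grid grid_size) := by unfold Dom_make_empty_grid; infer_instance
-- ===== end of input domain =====

-- B builds the grid in two phases (allocate zero rows, then paint the border) instead of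
-- A's per-cell nested conditional append; a more idiomatic decomposition of the same task.


-- ===== PORT A =====
-- literal transliteration: for y in range(h): append []; for x in range(w): append 1/0 to the row
def make_empty_grid (grid_size : Int × Int) : List (List Int) :=
  (PySem.List.pyRange 0 grid_size.2).foldl (fun grid y =>
    grid ++ [(PySem.List.pyRange 0 grid_size.1).foldl (fun row x =>
      row ++ [if y = 0 ∨ y = grid_size.2 - 1 then (1 : Int)
              else if x = 0 ∨ x = grid_size.1 - 1 then 1 else 0]) []]) []

-- ===== PORT B =====
-- row[0] = 1; row[-1] = 1  (guarded by w > 0, so both indices are in range)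
def pvStampRow (row : List Int) : List Int :=
  (row.set 0 1).set (row.length - 1) 1

def make_empty_grid_alt (grid_size : Int × Int) : List (List Int) :=
  let w := grid_size.1
  let h := grid_size.2
  -- phase 1: [[0]*w for _ in range(h)]  ([0]*w = [] for w ≤ 0, as in Python)
  let grid := (List.range h.toNat).map (fun _ => List.replicate w.toNat (0 : Int))
  -- phase 2a: grid[0] = [1]*w; grid[-1] = [1]*w
  let grid := if 0 < h then
      (grid.set 0 (List.replicate w.toNat 1)).set (grid.length - 1) (List.replicate w.toNat 1)
    else grid
  -- phase 2b: stamp first/last cell of every row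
  if 0 < w then grid.map pvStampRow else grid

-- ===== PRECONDITION & SPEC =====
def Spec_make_empty_grid (grid_size : Int × Int) (out : List (List Int)) : Prop := out = make_empty_grid_alt grid_size
instance (grid_size : Int × Int) (out : List (List Int)) : Decidable (Spec_make_empty_grid grid_size out) := by unfold Spec_make_empty_grid; infer_instance

-- ===== CLAIM (what is proved, stated in full; the proofs are below) =====
def Claim_equal_make_empty_grid : Prop := ∀ (grid_size : Int × Int), Dom_make_empty_grid grid_size → Spec_make_empty_grid grid_size (make_empty_grid grid_size)

-- ===== LEMMAS AND PROOFS =====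

theorem pyRange_zero_toNat (h : Int) :
    PySem.List.pyRange 0 h = (List.range h.toNat).map (fun (k : Nat) => (k : Int)) := by
  by_cases hp : 0 ≤ h
  · have : h = ((h.toNat : Nat) : Int) := by omega
    rw [this, PySem.List.pyRange_zero_natCast, Int.toNat_natCast]
  · have h1 : PySem.List.pyRange 0 h = [] := by
      simp [PySem.List.pyRange]; omega
    have h2 : h.toNat = 0 := by omega
    simp [h1, h2]

-- A as a double map over Nat ranges
theorem make_empty_grid_eq_map (w h : Int) :
    make_empty_grid (w, h) =
      (List.range h.toNat).map (fun (y : Nat) => (List.range w.toNat).map (fun (x : Nat) =>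
        if (y : Int) = 0 ∨ (y : Int) = h - 1 then (1 : Int)
        else if (x : Int) = 0 ∨ (x : Int) = w - 1 then 1 else 0)) := by
  unfold make_empty_grid
  simp only [pyRange_zero_toNat, List.foldl_map,
    PySem.List.foldl_append_singleton_eq_map, List.nil_append]

-- one row of A equals the corresponding stamped row of B (interior sizes positive)
theorem rowA_eq (w h : Int) (hw : 0 < w) (hh : 0 < h) (y : Nat) (hy : y < h.toNat) :
    (List.range w.toNat).map (fun (x : Nat) =>
        if (y : Int) = 0 ∨ (y : Int) = h - 1 then (1 : Int)
        else if (x : Int) = 0 ∨ (x : Int) = w - 1 then 1 else 0) =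
      pvStampRow (if y = 0 ∨ y = h.toNat - 1 then List.replicate w.toNat (1 : Int)
                  else List.replicate w.toNat 0) := by
  apply List.ext_getElem
  · by_cases hc : y = 0 ∨ y = h.toNat - 1 <;> simp [pvStampRow, hc]
  · intro x hx1 hx2
    simp only [List.length_map, List.length_range] at hx1
    by_cases hc : y = 0 ∨ y = h.toNat - 1 <;>
      simp only [hc, if_true, if_false, pvStampRow, List.getElem_map, List.getElem_range,
        List.length_replicate, List.getElem_set, List.getElem_replicate] <;>
      split_ifs <;> omega

-- B as a map over Nat range (both sizes positive)
theorem alt_eq_map (w h : Int) (hw : 0 < w) (hh : 0 < h) :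
    make_empty_grid_alt (w, h) =
      (List.range h.toNat).map (fun (y : Nat) =>
        pvStampRow (if y = 0 ∨ y = h.toNat - 1 then List.replicate w.toNat (1 : Int)
                    else List.replicate w.toNat 0)) := by
  unfold make_empty_grid_alt
  simp only [if_pos hh, if_pos hw]
  apply List.ext_getElem
  · simp
  · intro y hy1 hy2
    simp only [List.length_map, List.length_range] at hy2
    simp only [List.getElem_map, List.getElem_set, List.length_map, List.length_range,
      List.getElem_range]
    congr 1
    split_ifs <;> first | rfl | omega

theorem make_empty_grid_spec' (w h : Int) :
    make_empty_grid (w, h) = make_empty_grid_alt (w, h) := by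
  by_cases hh : 0 < h
  · by_cases hw : 0 < w
    · rw [make_empty_grid_eq_map, alt_eq_map w h hw hh]
      exact List.map_congr_left (fun y hy => rowA_eq w h hw hh y (List.mem_range.mp hy))
    · -- w ≤ 0 : every row is empty on both sides
      rw [make_empty_grid_eq_map]
      unfold make_empty_grid_alt
      have hw0 : w.toNat = 0 := by omega
      simp only [if_pos hh, if_neg hw, hw0, List.replicate_zero, List.range_zero,
        List.map_nil]
      apply List.ext_getElem
      · simp
      · intro y hy1 hy2
        simp
  · -- h ≤ 0 : both grids empty
    have hh0 : h.toNat = 0 := by omega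
    rw [make_empty_grid_eq_map]
    unfold make_empty_grid_alt
    simp [hh0, hh]

-- ===== VERDICT (by name: the statement is the Claim_ definition above) =====
theorem make_empty_grid_spec : Claim_equal_make_empty_grid := by
  intro gs _
  unfold Spec_make_empty_grid
  obtain ⟨w, h⟩ := gs
  exact make_empty_grid_spec' w h
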